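-- pv_equiv track=rewrite | github.com/parasiitism/AlgoDaily | leetcode/2145-count-the-hidden-sequences/main.py | bsearchSmallest
-- ===== SOURCE A (Python) =====
-- def bsearchSmallest(differences, lower, upper):
--     left = lower
--     right = upper + 1
--     while left < right:
--         mid = (left + right)//2
--
--         pfs = mid
--         canFormSequence = 0
--         for d in differences:
--             pfs += d
--             if pfs < lower:
--                 canFormSequence = -1
--                 break
--             elif pfs > upper:
--                 canFormSequence = 1
--                 break
--
--         if canFormSequence >= 0:
--             right = mid
--         else:
--             left = mid + 1
--     return left
-- ===== SOURCE B (Python) =====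
-- def bsearchSmallest(differences, lower, upper):
--     # Alternative to binary search: one backwards pass. t = threshold such that a start value s fails
--     # (first out-of-range prefix falls below lower) iff s < t; then clamp
--     # the threshold into [lower, upper + 1].
--     t = None
--     for d in reversed(differences):
--         if t is None:
--             t = lower - d
--         else:
--             t = max(lower - d, min(upper + 1 - d, t - d))
--     if t is None:
--         return lower
--     return max(lower, min(t, upper + 1))
-- ===== Notes on version B (the rewrite author's own statement) =====
-- stated objective: alternative
-- what changed: Replaced the binary search over start values (each probe rescanning the differences) with a single backwards pass that computes the exact failure threshold via a running max/min recurrence, then clamps it into [lower, upper+1].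
import Mathlib
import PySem

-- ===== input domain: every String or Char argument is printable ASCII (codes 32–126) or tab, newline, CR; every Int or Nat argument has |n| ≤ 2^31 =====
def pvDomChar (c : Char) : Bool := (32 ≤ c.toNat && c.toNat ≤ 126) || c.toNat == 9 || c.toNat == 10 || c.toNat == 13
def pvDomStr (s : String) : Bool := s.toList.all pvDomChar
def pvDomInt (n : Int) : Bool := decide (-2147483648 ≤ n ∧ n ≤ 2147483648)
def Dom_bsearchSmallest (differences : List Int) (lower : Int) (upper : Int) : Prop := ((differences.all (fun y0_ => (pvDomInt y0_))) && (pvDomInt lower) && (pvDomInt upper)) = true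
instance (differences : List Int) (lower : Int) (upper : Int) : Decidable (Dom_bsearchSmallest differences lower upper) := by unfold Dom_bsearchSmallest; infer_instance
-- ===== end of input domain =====

-- B replaces A's binary search (with its inner rescanning loop) by one
-- backwards pass computing the exact failure threshold via a max/min
-- recurrence, then clamping it into [lower, upper+1]; objective: alternative.

-- ===== PORT A =====

-- inner for-loop of A: pfs is the running prefix sum, returns canFormSequence
def pvInner (lower upper : Int) : List Int → Int → Int
  | [], _ => 0
  | d :: ds, pfs =>
    let p := pfs + d
    if p < lower then -1
    else if p > upper then 1
    else pvInner lower upper ds p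

-- the while-loop of A, recursion on right - left
def pvGo (differences : List Int) (lower upper : Int) (left right : Int) : Int :=
  if h : left < right then
    let mid := PySem.Int.floordiv (left + right) 2
    if 0 ≤ pvInner lower upper differences mid then
      pvGo differences lower upper left mid
    else
      pvGo differences lower upper (mid + 1) right
  else left
termination_by (right - left).toNat
decreasing_by
  · have := (PySem.Int.floordiv_two_mid_bounds (le_of_lt h) : left ≤ PySem.Int.floordiv (left + right) 2 ∧ PySem.Int.floordiv (left + right) 2 ≤ right)
    have h2 : PySem.Int.floordiv (left + right) 2 = (left + right) / 2 :=
      PySem.Int.floordiv_eq_ediv_of_pos (by omega)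
    simp only [mid] at *
    omega
  · have := (PySem.Int.floordiv_two_mid_bounds (le_of_lt h) : left ≤ PySem.Int.floordiv (left + right) 2 ∧ PySem.Int.floordiv (left + right) 2 ≤ right)
    have h2 : PySem.Int.floordiv (left + right) 2 = (left + right) / 2 :=
      PySem.Int.floordiv_eq_ediv_of_pos (by omega)
    simp only [mid] at *
    omega

def bsearchSmallest (differences : List Int) (lower : Int) (upper : Int) : Int :=
  pvGo differences lower upper lower (upper + 1)

-- ===== PORT B =====

-- the backwards pass of Source B: accumulator t over reversed(differences)
def pvThresh (lower upper : Int) : List Int → Option Int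
  | [] => none
  | d :: ds =>
    some (match pvThresh lower upper ds with
      | none => lower - d
      | some t => max (lower - d) (min (upper + 1 - d) (t - d)))

def bsearchSmallest_alt (differences : List Int) (lower : Int) (upper : Int) : Int :=
  match pvThresh lower upper differences with
  | none => lower
  | some t => max lower (min t (upper + 1))

-- ===== PRECONDITION & SPEC =====
def Spec_bsearchSmallest (differences : List Int) (lower : Int) (upper : Int) (out : Int) : Prop := out = bsearchSmallest_alt differences lower upper
instance (differences : List Int) (lower : Int) (upper : Int) (out : Int) : Decidable (Spec_bsearchSmallest differences lower upper out) := by unfold Spec_bsearchSmallest; infer_instance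

-- ===== CLAIM (what is proved, stated in full; the proofs are below) =====
def Claim_equal_bsearchSmallest : Prop := ∀ (differences : List Int) (lower : Int) (upper : Int), Dom_bsearchSmallest differences lower upper → Spec_bsearchSmallest differences lower upper (bsearchSmallest differences lower upper)

-- ===== LEMMAS AND PROOFS =====

-- the inner scan succeeds (canFormSequence ≥ 0) iff the start value is at or
-- above B's threshold
theorem pvInner_iff (lower upper : Int) (ds : List Int) (pfs : Int) :
    0 ≤ pvInner lower upper ds pfs ↔
      (match pvThresh lower upper ds with
        | none => True
        | some t => t ≤ pfs) := by
  induction ds generalizing pfs with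
  | nil => simp [pvInner, pvThresh]
  | cons d ds ih =>
    simp only [pvInner, pvThresh]
    by_cases h1 : pfs + d < lower
    · simp only [if_pos h1]
      cases hts : pvThresh lower upper ds with
      | none => simp; omega
      | some t => simp; omega
    · simp only [if_neg h1]
      by_cases h2 : pfs + d > upper
      · simp only [if_pos h2]
        cases hts : pvThresh lower upper ds with
        | none => simp; omega
        | some t => simp; omega
      · simp only [if_neg h2]
        have := ih (pfs + d)
        cases hts : pvThresh lower upper ds with
        | none =>
          rw [hts] at this; simp at this ⊢; omega
        | some t =>
          rw [hts] at this; simp at this ⊢; omega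

-- binary search converges to R whenever R splits [left, right) into
-- failing starts below R and succeeding starts from R up
theorem pvGo_eq (differences : List Int) (lower upper : Int) (R : Int) :
    ∀ left right : Int, left ≤ R → R ≤ right →
      (∀ m, left ≤ m → m < R → ¬ 0 ≤ pvInner lower upper differences m) →
      (∀ m, R ≤ m → m < right → 0 ≤ pvInner lower upper differences m) →
      pvGo differences lower upper left right = R := by
  intro left right
  induction hwf : (right - left).toNat using Nat.strong_induction_on generalizing left right with
  | _ n ih =>
    intro hlR hRr hlo hhi
    rw [pvGo]
    by_cases h : left < right
    · simp only [dif_pos h]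
      have hmid := PySem.Int.floordiv_two_mid_bounds (le_of_lt h)
      have h2 : PySem.Int.floordiv (left + right) 2 = (left + right) / 2 :=
        PySem.Int.floordiv_eq_ediv_of_pos (by omega)
      set mid := PySem.Int.floordiv (left + right) 2 with hm
      have hmlt : mid < right := by omega
      have hmge : left ≤ mid := by omega
      by_cases hp : 0 ≤ pvInner lower upper differences mid
      · simp only [if_pos hp]
        have hRm : R ≤ mid := by
          by_contra hc
          exact hlo mid hmge (by omega) hp
        exact ih ((mid - left).toNat) (by omega) left mid rfl hlR hRm hlo
          (fun m hm1 hm2 => hhi m hm1 (by omega))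
      · simp only [if_neg hp]
        have hmR : mid < R := by
          by_contra hc
          exact hp (hhi mid (by omega) hmlt)
        exact ih ((right - (mid + 1)).toNat) (by omega) (mid + 1) right rfl
          (by omega) hRr (fun m hm1 hm2 => hlo m (by omega) hm2) hhi
    · simp only [dif_neg h]
      omega

theorem bsearchSmallest_spec_aux (differences : List Int) (lower upper : Int) :
    bsearchSmallest differences lower upper = bsearchSmallest_alt differences lower upper := by
  unfold bsearchSmallest bsearchSmallest_alt
  by_cases hle : lower ≤ upper + 1
  · cases hts : pvThresh lower upper differences with
    | none =>
      apply pvGo_eq differences lower upper lower lower (upper + 1) le_rfl hle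
      · intro m h1 h2; omega
      · intro m h1 h2
        have := pvInner_iff lower upper differences m
        rw [hts] at this; simpa using this.mpr trivial
    | some t =>
      apply pvGo_eq differences lower upper (max lower (min t (upper + 1))) lower (upper + 1)
      · omega
      · omega
      · intro m h1 h2
        have := pvInner_iff lower upper differences m
        rw [hts] at this
        simp only [this]; omega
      · intro m h1 h2
        have := pvInner_iff lower upper differences m
        rw [hts] at this
        simp only [this]; omega
  · -- lower > upper + 1: the while loop never runs and A returns lower
    rw [pvGo]
    simp only [dif_neg (by omega : ¬ lower < upper + 1)]
    cases pvThresh lower upper differences with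
    | none => rfl
    | some t => simp; omega

-- ===== VERDICT (by name: the statement is the Claim_ definition above) =====
theorem bsearchSmallest_spec : Claim_equal_bsearchSmallest := by
  intro differences lower upper _
  exact bsearchSmallest_spec_aux differences lower upper
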